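-- pv_equiv track=rewrite | github.com/JazzzFM/Latticed-Manim | Laticed.py | heuristic_u_plus_v
-- ===== SOURCE A (Python) =====
-- def vector_add(a, b):
--     return [a[i] + b[i] for i in range(len(a))]
--
-- def heuristic_u_plus_v(n):
--     row = len(n)
--     col = len(n[0])
--     # negative vectors
--     minus_1_tab = []
--     # positive vectors
--     plus_1_tab = []
--
--     # this vector finishes with -1
--     minus_1_vect = [0 for i in range(row)]
--     # this vector finishes with 1
--     plus_1_vect = [0 for i in range(row)]
--
--     for i in range(col):
--         if n[row - 1][i] == 1:
--             for j in range(row):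
--                 plus_1_vect[j] = int(n[j][i])
--
--             if plus_1_vect not in plus_1_tab:
--                 plus_1_tab.append(plus_1_vect)
--
--         elif n[row - 1][i] == -1:
--             for j in range(row):
--                 minus_1_vect[j] = int(n[j][i])
--
--             if minus_1_vect not in minus_1_tab:
--                 minus_1_tab.append(minus_1_vect)
--     return vector_add(minus_1_vect, plus_1_vect)[:-1]
-- ===== SOURCE B (Python) =====
-- def heuristic_u_plus_v(n):
--     row = len(n)
--     col = len(n[0])
--     last = [n[row - 1][i] for i in range(col)]
--     plus = [0] * row
--     for i in reversed(range(col)):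
--         if last[i] == 1:
--             plus = [int(n[j][i]) for j in range(row)]
--             break
--     minus = [0] * row
--     for i in reversed(range(col)):
--         if last[i] == -1:
--             minus = [int(n[j][i]) for j in range(row)]
--             break
--     return [minus[j] + plus[j] for j in range(row)][:-1]
-- ===== Notes on version B (the rewrite author's own statement) =====
-- stated objective: simpler
-- what changed: Replaces A's single forward loop that accumulates both sign-vectors and two dead deduplication tables with two backward searches that each find the last column whose bottom entry is 1 (resp. -1) and stop; the tables are dropped entirely.
import Mathlib
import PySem

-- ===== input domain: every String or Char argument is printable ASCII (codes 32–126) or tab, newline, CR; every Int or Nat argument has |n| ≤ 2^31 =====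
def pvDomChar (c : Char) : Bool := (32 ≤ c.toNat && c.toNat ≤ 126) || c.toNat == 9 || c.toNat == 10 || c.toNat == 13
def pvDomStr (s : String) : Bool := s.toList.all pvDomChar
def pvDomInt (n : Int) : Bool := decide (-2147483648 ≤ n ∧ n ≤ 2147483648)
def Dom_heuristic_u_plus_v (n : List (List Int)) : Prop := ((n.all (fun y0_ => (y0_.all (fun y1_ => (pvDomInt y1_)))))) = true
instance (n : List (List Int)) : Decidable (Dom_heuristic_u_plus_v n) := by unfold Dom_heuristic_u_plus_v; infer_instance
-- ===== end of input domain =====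

-- B replaces A's forward accumulate-both loop (and its dead tables) by two targeted
-- backward column searches; objective: simpler, same asymptotic cost.

-- ===== PORT A =====
-- the column vector [int(n[j][i]) for j in range(row)]
def pvColVec (n : List (List Int)) (row i : Nat) : List Int :=
  (List.range row).map (fun j => (n.getD j []).getD i 0)

-- port of A: one forward loop over columns keeping the tables and the two vectors
def heuristic_u_plus_v (n : List (List Int)) : List Int :=
  let row := n.length
  let col := (n.headD []).length
  let st := (List.range col).foldl
    (fun (st : (List (List Int) × List (List Int)) × (List Int × List Int)) i =>
      if (n.getD (row - 1) []).getD i 0 = 1 then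
        let p := pvColVec n row i
        ((st.1.1, if st.1.2.contains p then st.1.2 else st.1.2 ++ [p]), (st.2.1, p))
      else if (n.getD (row - 1) []).getD i 0 = -1 then
        let m := pvColVec n row i
        ((if st.1.1.contains m then st.1.1 else st.1.1 ++ [m], st.1.2), (m, st.2.2))
      else st)
    (([], []), (List.replicate row 0, List.replicate row 0))
  -- vector_add(minus_1_vect, plus_1_vect)[:-1]
  ((List.range st.2.1.length).map (fun j => st.2.1.getD j 0 + st.2.2.getD j 0)).dropLast

-- ===== PORT B =====
-- first index i in l with last[i] = t gives the column vector; else all zeros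
def pvSearchBack (n : List (List Int)) (last : List Int) (t : Int) (row : Nat) :
    List Nat → List Int
  | [] => List.replicate row 0
  | i :: is => if last.getD i 0 = t then pvColVec n row i else pvSearchBack n last t row is

def heuristic_u_plus_v_alt (n : List (List Int)) : List Int :=
  let row := n.length
  let col := (n.headD []).length
  let last := (List.range col).map (fun i => (n.getD (row - 1) []).getD i 0)
  let plus := pvSearchBack n last 1 row (List.range col).reverse
  let minus := pvSearchBack n last (-1) row (List.range col).reverse
  ((List.range row).map (fun j => minus.getD j 0 + plus.getD j 0)).dropLast

-- ===== PRECONDITION & SPEC =====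
-- Pre_ excludes exactly the inputs where Python A raises (IndexError): the empty list,
-- a bottom row shorter than the first row, and ragged inputs where a ±1-bottomed column
-- is missing an entry in some row.
def Pre_heuristic_u_plus_v (n : List (List Int)) : Prop :=
  n ≠ [] ∧ (n.headD []).length ≤ (n.getLastD []).length ∧
  ∀ i ∈ List.range (n.headD []).length,
    ((n.getLastD []).getD i 0 = 1 ∨ (n.getLastD []).getD i 0 = -1) →
    ∀ r ∈ n, i < r.length

instance (n : List (List Int)) : Decidable (Pre_heuristic_u_plus_v n) := by
  unfold Pre_heuristic_u_plus_v; infer_instance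

def pvWitness_heuristic_u_plus_v : List (List Int) := [[1, 2], [1, -1]]

def Spec_heuristic_u_plus_v (n : List (List Int)) (out : List Int) : Prop := out = heuristic_u_plus_v_alt n
instance (n : List (List Int)) (out : List Int) : Decidable (Spec_heuristic_u_plus_v n out) := by unfold Spec_heuristic_u_plus_v; infer_instance

-- ===== CLAIM (what is proved, stated in full; the proofs are below) =====
def Claim_equal_heuristic_u_plus_v : Prop := ∀ (n : List (List Int)), Dom_heuristic_u_plus_v n → Pre_heuristic_u_plus_v n → Spec_heuristic_u_plus_v n (heuristic_u_plus_v n)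

-- ===== LEMMAS AND PROOFS =====

-- proof-side variant of the backward search, testing the bottom entry directly
def pvSearchBack' (n : List (List Int)) (t : Int) (row : Nat) : List Nat → List Int
  | [] => List.replicate row 0
  | i :: is =>
      if (n.getD (n.length - 1) []).getD i 0 = t then pvColVec n row i
      else pvSearchBack' n t row is

-- the 2-component step A's vectors follow (tables stripped)
def pvStep2 (n : List (List Int)) (row : Nat) (st : List Int × List Int) (i : Nat) :
    List Int × List Int :=
  if (n.getD (n.length - 1) []).getD i 0 = 1 then (st.1, pvColVec n row i)
  else if (n.getD (n.length - 1) []).getD i 0 = -1 then (pvColVec n row i, st.2)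
  else st

lemma pvFold_snd (n : List (List Int)) (row : Nat) :
    ∀ (l : List Nat) (st : (List (List Int) × List (List Int)) × (List Int × List Int)),
    (l.foldl
      (fun (st : (List (List Int) × List (List Int)) × (List Int × List Int)) i =>
        if (n.getD (n.length - 1) []).getD i 0 = 1 then
          let p := pvColVec n row i
          ((st.1.1, if st.1.2.contains p then st.1.2 else st.1.2 ++ [p]), (st.2.1, p))
        else if (n.getD (n.length - 1) []).getD i 0 = -1 then
          let m := pvColVec n row i
          ((if st.1.1.contains m then st.1.1 else st.1.1 ++ [m], st.1.2), (m, st.2.2))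
        else st) st).2
    = l.foldl (pvStep2 n row) st.2 := by
  intro l
  induction l with
  | nil => intro st; rfl
  | cons i is ih =>
      intro st
      simp only [List.foldl_cons]
      rw [ih]
      unfold pvStep2
      split_ifs <;> rfl

lemma pvSearchBack'_cons (n : List (List Int)) (t : Int) (row i : Nat) (is : List Nat) :
    pvSearchBack' n t row (i :: is)
    = if (n.getD (n.length - 1) []).getD i 0 = t then pvColVec n row i
      else pvSearchBack' n t row is := rfl

lemma pvFold2_eq_search (n : List (List Int)) (row : Nat) :
    ∀ col : Nat,
    (List.range col).foldl (pvStep2 n row) (List.replicate row 0, List.replicate row 0)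
    = (pvSearchBack' n (-1) row (List.range col).reverse,
       pvSearchBack' n 1 row (List.range col).reverse) := by
  intro col
  induction col with
  | zero => rfl
  | succ c ih =>
      rw [List.range_succ, List.foldl_append, ih, List.reverse_append]
      simp only [List.reverse_cons, List.reverse_nil, List.nil_append, List.cons_append,
        List.foldl_cons, List.foldl_nil, pvSearchBack'_cons]
      unfold pvStep2
      split_ifs with h1 h2 <;> simp_all

lemma pvSearchBack'_length (n : List (List Int)) (t : Int) (row : Nat) :
    ∀ l : List Nat, (pvSearchBack' n t row l).length = row := by
  intro l
  induction l with
  | nil => simp [pvSearchBack']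
  | cons i is ih =>
      rw [pvSearchBack'_cons]
      split_ifs
      · simp [pvColVec]
      · exact ih

lemma pvSearchBack_eq' (n : List (List Int)) (col : Nat)
    (last : List Int) (hlast : last = (List.range col).map (fun i => (n.getD (n.length - 1) []).getD i 0))
    (t : Int) (row : Nat) :
    ∀ l : List Nat, (∀ i ∈ l, i < col) →
    pvSearchBack n last t row l = pvSearchBack' n t row l := by
  intro l
  induction l with
  | nil => intro _; rfl
  | cons i is ih =>
      intro h
      have hi : i < col := h i (List.mem_cons_self ..)
      have hv : last.getD i 0 = (n.getD (n.length - 1) []).getD i 0 := by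
        subst hlast
        simp [List.getD_eq_getElem?_getD, hi]
      rw [pvSearchBack, pvSearchBack'_cons, hv]
      split_ifs
      · rfl
      · exact ih (fun j hj => h j (List.mem_cons_of_mem _ hj))

-- ===== VERDICT (by name: the statement is the Claim_ definition above) =====
theorem heuristic_u_plus_v_spec : Claim_equal_heuristic_u_plus_v := by
  intro n _ _
  unfold Spec_heuristic_u_plus_v heuristic_u_plus_v heuristic_u_plus_v_alt
  simp only
  rw [pvFold_snd, pvFold2_eq_search]
  rw [pvSearchBack_eq' n (n.headD []).length _ rfl 1 n.length _
        (by intro i hi; simpa using (List.mem_reverse.mp hi)),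
      pvSearchBack_eq' n (n.headD []).length _ rfl (-1) n.length _
        (by intro i hi; simpa using (List.mem_reverse.mp hi)),
      pvSearchBack'_length]
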